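-- pv_equiv track=rewrite | github.com/jonusHK/algorithm_data_structure | practice/practice_38.py | solution
-- ===== SOURCE A (Python) =====
-- def solution(inputs, pattern):
--     result = []
--     for input in inputs:
--         ptr = 0
--         is_break = False
--         for s in input:
--             if s.isupper() and (ptr == len(pattern) or pattern[ptr] != s):
--                 is_break = True
--                 break
--
--             if ptr < len(pattern) and s == pattern[ptr]:
--                 ptr += 1
--
--         result.append(not is_break and ptr == len(pattern))
--
--     return result
-- ===== SOURCE B (Python) =====
-- def solution(inputs, pattern):
--     pattern_uppers = ''.join(filter(str.isupper, pattern))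
--     result = []
--     for input in inputs:
--         it = iter(input)
--         subseq = all(c in it for c in pattern)
--         result.append(''.join(filter(str.isupper, input)) == pattern_uppers and subseq)
--     return result
-- ===== Notes on version B (the rewrite author's own statement) =====
-- stated objective: idiomatic
-- what changed: Replaces the interleaved pointer-with-break scan by two independent standard-library-style checks per string: uppercase-sequence equality via filter(str.isupper) and greedy subsequence via the iter/in idiom, ANDed together.
import Mathlib
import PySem

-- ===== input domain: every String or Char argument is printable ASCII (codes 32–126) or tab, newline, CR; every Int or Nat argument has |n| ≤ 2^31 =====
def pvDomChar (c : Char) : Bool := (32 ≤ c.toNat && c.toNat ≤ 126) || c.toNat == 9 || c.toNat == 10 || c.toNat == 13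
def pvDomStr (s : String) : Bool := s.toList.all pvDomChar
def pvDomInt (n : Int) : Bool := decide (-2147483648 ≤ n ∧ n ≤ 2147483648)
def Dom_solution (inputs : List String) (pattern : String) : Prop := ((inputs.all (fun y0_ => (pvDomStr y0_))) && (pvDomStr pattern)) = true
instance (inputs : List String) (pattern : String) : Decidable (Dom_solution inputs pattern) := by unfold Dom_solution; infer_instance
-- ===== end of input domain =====

-- B replaces A's interleaved pointer-with-break scan by two independent per-string checks
-- (uppercase-filter equality, and greedy subsequence) ANDed together (objective: idiomatic).

-- ===== PORT A =====
-- inner 'for s in input' loop of A: state = (ptr); returning false = the 'break' with is_break,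
-- reaching the end returns 'not is_break and ptr == len(pattern)'
def solAInner : List Char → List Char → Nat → Bool
  | [], pat, ptr => ptr == pat.length
  | s :: rest, pat, ptr =>
    if PySem.Chars.isupper s && (ptr == pat.length || !(pat[ptr]? == some s)) then
      false
    else if decide (ptr < pat.length) && (pat[ptr]? == some s) then
      solAInner rest pat (ptr + 1)
    else
      solAInner rest pat ptr

def solution (inputs : List String) (pattern : String) : List Bool :=
  inputs.map (fun input => solAInner input.toList pattern.toList 0)

-- ===== PORT B =====
-- ''.join(filter(str.isupper, s))
def upperFilter (cs : List Char) : List Char := cs.filter PySem.Chars.isupper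

-- 'it = iter(input); all(c in it for c in pattern)' is the greedy subsequence scan = List.isSublist
def solution_alt (inputs : List String) (pattern : String) : List Bool :=
  let patternUppers := upperFilter pattern.toList
  inputs.map (fun input =>
    (upperFilter input.toList == patternUppers) && pattern.toList.isSublist input.toList)

-- ===== PRECONDITION & SPEC =====
def Spec_solution (inputs : List String) (pattern : String) (out : List Bool) : Prop := out = solution_alt inputs pattern
instance (inputs : List String) (pattern : String) (out : List Bool) : Decidable (Spec_solution inputs pattern out) := by unfold Spec_solution; infer_instance

-- ===== CLAIM (what is proved, stated in full; the proofs are below) =====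
def Claim_equal_solution : Prop := ∀ (inputs : List String) (pattern : String), Dom_solution inputs pattern → Spec_solution inputs pattern (solution inputs pattern)

-- ===== LEMMAS AND PROOFS =====

theorem upperFilter_cons_upper {c : Char} (h : PySem.Chars.isupper c = true) (cs : List Char) :
    upperFilter (c :: cs) = c :: upperFilter cs := by
  simp [upperFilter, h]

theorem upperFilter_cons_lower {c : Char} (h : PySem.Chars.isupper c = false) (cs : List Char) :
    upperFilter (c :: cs) = upperFilter cs := by
  simp [upperFilter, h]

-- greedy subsequence implies the uppercase filters are sublists, hence a length bound
theorem upperFilter_len_le {p cs : List Char} (h : p.isSublist cs = true) :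
    (upperFilter p).length ≤ (upperFilter cs).length := by
  have hs : p.Sublist cs := List.isSublist_iff_sublist.mp h
  exact (hs.filter PySem.Chars.isupper).length_le

-- the per-string equivalence: A's two-pointer loop at pattern position ptr equals
-- (uppercase filters equal && greedy subsequence) for the pattern suffix
theorem solAInner_eq (cs : List Char) : ∀ (pat : List Char) (ptr : Nat), ptr ≤ pat.length →
    solAInner cs pat ptr =
      ((upperFilter cs == upperFilter (pat.drop ptr)) && (pat.drop ptr).isSublist cs) := by
  induction cs with
  | nil =>
    intro pat ptr hle
    by_cases h : ptr = pat.length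
    · subst h; simp [solAInner, upperFilter, List.isSublist]
    · have hd : pat.drop ptr ≠ [] := by
        simp only [ne_eq, List.drop_eq_nil_iff]; omega
      obtain ⟨q, qs, hqs⟩ := List.exists_cons_of_ne_nil hd
      rw [hqs]
      show (ptr == pat.length) = _
      simp [List.isSublist, h]
  | cons c rest ih =>
    intro pat ptr hle
    have hget : pat[ptr]? = (pat.drop ptr).head? := by
      simp [List.head?_drop]
    show (if (PySem.Chars.isupper c && ((ptr == pat.length) || !(pat[ptr]? == some c))) = true
          then false
          else if (decide (ptr < pat.length) && (pat[ptr]? == some c)) = true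
          then solAInner rest pat (ptr + 1) else solAInner rest pat ptr) = _
    rcases hdrop : pat.drop ptr with _ | ⟨q, qs⟩
    · -- pattern exhausted
      have hptr : ptr = pat.length := by
        have := List.drop_eq_nil_iff.mp hdrop; omega
      have hnone : pat[ptr]? = none := by rw [hget, hdrop]; rfl
      by_cases hup : PySem.Chars.isupper c = true
      · rw [if_pos (by simp [hup, hptr])]
        rw [upperFilter_cons_upper hup]
        simp [upperFilter, List.isSublist]
      · have hup' : PySem.Chars.isupper c = false := Bool.eq_false_iff.mpr hup
        rw [if_neg (by simp [hup']), if_neg (by simp [hptr])]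
        have := ih pat ptr hle
        rw [hdrop] at this
        rw [this, upperFilter_cons_lower hup']
        simp [List.isSublist]
    · -- pattern suffix q :: qs
      have hne : ptr ≠ pat.length := by
        intro h; rw [h, List.drop_length] at hdrop; cases hdrop
      have hlt : ptr < pat.length := lt_of_le_of_ne hle hne
      have hhead : pat[ptr]? = some q := by rw [hget, hdrop]; rfl
      have hdrop1 : pat.drop (ptr + 1) = qs := by
        rw [← List.tail_drop, hdrop]; rfl
      by_cases hqc : q = c
      · -- current char matches the pattern head: both sides advance
        subst hqc
        rw [if_neg (by rw [hhead]; simp [hne]), if_pos (by rw [hhead]; simp [hlt])]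
        have hIH := ih pat (ptr + 1) (by omega)
        rw [hdrop1] at hIH
        rw [hIH]
        by_cases hqup : PySem.Chars.isupper q = true
        · rw [upperFilter_cons_upper hqup, upperFilter_cons_upper hqup]
          simp [List.isSublist]
        · have hq' : PySem.Chars.isupper q = false := Bool.eq_false_iff.mpr hqup
          rw [upperFilter_cons_lower hq', upperFilter_cons_lower hq']
          simp [List.isSublist]
      · by_cases hup : PySem.Chars.isupper c = true
        · -- uppercase mismatch: A breaks, B is false
          rw [if_pos (by rw [hhead]; simp [hup, hqc])]
          by_cases hqup : PySem.Chars.isupper q = true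
          · rw [upperFilter_cons_upper hup, upperFilter_cons_upper hqup]
            simp; intro h; exact absurd h.symm hqc
          · have hq' : PySem.Chars.isupper q = false := Bool.eq_false_iff.mpr hqup
            rw [upperFilter_cons_upper hup, upperFilter_cons_lower hq']
            rcases heq : (c :: upperFilter rest == upperFilter qs) with _ | _
            · simp
            · have heq' : c :: upperFilter rest = upperFilter qs := by simpa using heq
              rcases hsub : (q :: qs).isSublist (c :: rest) with _ | _
              · simp
              · exfalso
                have hsub' : (q :: qs).isSublist rest = true := by
                  have hne' : ¬ (q == c) = true := by simp [hqc]
                  simpa [List.isSublist, hne'] using hsub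
                have h1 := upperFilter_len_le hsub'
                rw [upperFilter_cons_lower hq', ← heq'] at h1
                simp at h1
        · -- lowercase non-matching char: loop keeps ptr, B skips it
          have hup' : PySem.Chars.isupper c = false := Bool.eq_false_iff.mpr hup
          rw [if_neg (by simp [hup'])]
          rw [if_neg (by rw [hhead]; simp [hqc])]
          have := ih pat ptr hle
          rw [hdrop] at this
          rw [this, upperFilter_cons_lower hup']
          have hne' : ¬ (q == c) = true := by simp [hqc]
          simp [List.isSublist, hne']

-- ===== VERDICT (by name: the statement is the Claim_ definition above) =====
theorem solution_spec : Claim_equal_solution := by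
  intro inputs pattern _
  unfold Spec_solution solution solution_alt
  simp only []
  apply List.map_congr_left
  intro input _
  have h := solAInner_eq input.toList pattern.toList 0 (Nat.zero_le _)
  simpa using h
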